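-- pv_equiv track=rewrite | github.com/26pratyush/Swap-and-Step-Cipher | swap&step.py | custom_decrypt
-- ===== SOURCE A (Python) =====
-- def shift_char(c, shift):
--     if 'a' <= c <= 'z':  # Handle lowercase letters
--         return chr((ord(c) - ord('a') + shift) % 26 + ord('a'))
--     elif 'A' <= c <= 'Z':  # Handle uppercase letters
--         return chr((ord(c) - ord('A') + shift) % 26 + ord('A'))
--     else:
--         return c
--
-- def custom_decrypt(encrypted_text, space_positions):
--     result = []
--     pairs = [encrypted_text[i:i+2] for i in range(0, len(encrypted_text), 2)]
--
--     for i, pair in enumerate(pairs):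
--         if len(pair) == 2:
--             adjusted_pair = ""
--             for j, char in enumerate(pair):
--                 new_position = 2 * i + j
--                 if new_position % 2 == 0:
--                     adjusted_pair += shift_char(char, -1)
--                 else:
--                     adjusted_pair += shift_char(char, 1)
--             result.append(adjusted_pair[1] + adjusted_pair[0])
--         else:
--             last_char = pair[0]
--             new_position = 2 * i
--             if new_position % 2 == 0:
--                 result.append(shift_char(last_char, -1))
--             else:
--                 result.append(shift_char(last_char, 1))
--
--     decrypted_text = ''.join(result)
--     for pos in space_positions:
--         decrypted_text = decrypted_text[:pos] + ' ' + decrypted_text[pos:]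
--
--     return decrypted_text
-- ===== SOURCE B (Python) =====
-- def custom_decrypt(encrypted_text, space_positions):
--     def shift(c, k):
--         o = ord(c)
--         if 97 <= o <= 122:
--             return chr((o - 97 + k) % 26 + 97)
--         if 65 <= o <= 90:
--             return chr((o - 65 + k) % 26 + 65)
--         return c
--
--     chars = []
--     n = len(encrypted_text)
--     i = 0
--     while i + 1 < n:
--         chars.append(shift(encrypted_text[i + 1], 1))
--         chars.append(shift(encrypted_text[i], -1))
--         i += 2
--     if i < n:
--         chars.append(shift(encrypted_text[i], -1))
--     for pos in space_positions:
--         chars.insert(pos, ' ')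
--     return ''.join(chars)
-- ===== Notes on version B (the rewrite author's own statement) =====
-- stated objective: simpler
-- what changed: B replaces A's pair-slicing + enumerate + parity-on-global-position + string swap machinery by a single two-characters-at-a-time pass over the string, and replaces A's per-space full string re-slicing by list.insert into a char list joined once at the end.
import Mathlib
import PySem

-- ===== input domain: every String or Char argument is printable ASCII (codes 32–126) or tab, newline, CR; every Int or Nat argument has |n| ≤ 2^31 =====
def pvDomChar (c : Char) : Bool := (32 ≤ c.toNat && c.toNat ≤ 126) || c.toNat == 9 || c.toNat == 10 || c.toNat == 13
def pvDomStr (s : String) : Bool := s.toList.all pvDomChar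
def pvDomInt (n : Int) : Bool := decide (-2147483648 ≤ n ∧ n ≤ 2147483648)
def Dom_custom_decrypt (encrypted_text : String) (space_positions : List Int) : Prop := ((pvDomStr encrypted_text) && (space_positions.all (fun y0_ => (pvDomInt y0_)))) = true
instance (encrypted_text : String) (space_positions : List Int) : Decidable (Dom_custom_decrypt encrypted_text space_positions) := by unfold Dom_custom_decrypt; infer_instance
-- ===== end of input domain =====

-- B replaces A's pair-slicing/enumerate/global-parity/string-swap machinery by one two-chars-at-a-time
-- pass and inserts spaces into a char list joined once (return value identical; objective: simpler).

-- ===== PORT A =====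
-- shift_char: Python compares chars with 'a' <= c <= 'z'
def pvShiftChar (c : Char) (shift : Int) : Char :=
  if 'a' ≤ c ∧ c ≤ 'z' then
    Char.ofNat ((PySem.Int.mod ((c.toNat : Int) - 97 + shift) 26).toNat + 97)
  else if 'A' ≤ c ∧ c ≤ 'Z' then
    Char.ofNat ((PySem.Int.mod ((c.toNat : Int) - 65 + shift) 26).toNat + 65)
  else c

-- literal transliteration of A over the code-point list; adjusted_pair[1]/[0] and pair[0] are
-- in-range indexings (length checked / pair nonempty), ported with pyGetD
def custom_decrypt (encrypted_text : String) (space_positions : List Int) : String :=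
  let cs := encrypted_text.toList
  let pairs := (PySem.List.pyRange 0 (cs.length : Int) 2).map
    (fun i => PySem.List.slice cs (some i) (some (i + 2)))
  let result := (PySem.List.enumerate pairs 0).foldl (fun res ip =>
    if ip.2.length = 2 then
      let adjusted := (PySem.List.enumerate ip.2 0).foldl (fun adj jc =>
        let newPos := 2 * ip.1 + jc.1
        if PySem.Int.mod newPos 2 = 0 then adj ++ [pvShiftChar jc.2 (-1)]
        else adj ++ [pvShiftChar jc.2 1]) []
      res ++ [[PySem.List.pyGetD adjusted 1 ' ', PySem.List.pyGetD adjusted 0 ' ']]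
    else
      let lastChar := PySem.List.pyGetD ip.2 0 ' '
      let newPos := 2 * ip.1
      if PySem.Int.mod newPos 2 = 0 then res ++ [[pvShiftChar lastChar (-1)]]
      else res ++ [[pvShiftChar lastChar 1]]) ([] : List (List Char))
  let decrypted := result.flatten
  String.ofList (space_positions.foldl (fun d pos =>
    PySem.List.slice d none (some pos) ++ ' ' :: PySem.List.slice d (some pos) none) decrypted)

-- ===== PORT B =====
-- B's shift helper compares ord(c) against numeric bounds
def pvShiftB (c : Char) (k : Int) : Char :=
  let o := c.toNat
  if 97 ≤ o ∧ o ≤ 122 then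
    Char.ofNat ((PySem.Int.mod ((o : Int) - 97 + k) 26).toNat + 97)
  else if 65 ≤ o ∧ o ≤ 90 then
    Char.ofNat ((PySem.Int.mod ((o : Int) - 65 + k) 26).toNat + 65)
  else c

-- B's while loop: two characters at a time, trailing single char shifted by -1
def pvDecPairs : List Char → List Char
  | a :: b :: rest => pvShiftB b 1 :: pvShiftB a (-1) :: pvDecPairs rest
  | [a] => [pvShiftB a (-1)]
  | [] => []

def custom_decrypt_alt (encrypted_text : String) (space_positions : List Int) : String :=
  String.ofList (space_positions.foldl (fun cs pos => PySem.List.insert cs pos ' ')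
    (pvDecPairs encrypted_text.toList))

-- ===== PRECONDITION & SPEC =====
def Spec_custom_decrypt (encrypted_text : String) (space_positions : List Int) (out : String) : Prop := out = custom_decrypt_alt encrypted_text space_positions
instance (encrypted_text : String) (space_positions : List Int) (out : String) : Decidable (Spec_custom_decrypt encrypted_text space_positions out) := by unfold Spec_custom_decrypt; infer_instance

-- ===== CLAIM (what is proved, stated in full; the proofs are below) =====
def Claim_equal_custom_decrypt : Prop := ∀ (encrypted_text : String) (space_positions : List Int), Dom_custom_decrypt encrypted_text space_positions → Spec_custom_decrypt encrypted_text space_positions (custom_decrypt encrypted_text space_positions)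

-- ===== LEMMAS AND PROOFS =====

theorem pvShift_eq (c : Char) (k : Int) : pvShiftChar c k = pvShiftB c k := by
  unfold pvShiftChar pvShiftB
  simp only [Char.le_def, UInt32.le_iff_toNat_le, Char.toNat,
    show 'a'.val.toNat = 97 from rfl, show 'z'.val.toNat = 122 from rfl,
    show 'A'.val.toNat = 65 from rfl, show 'Z'.val.toNat = 90 from rfl]

-- chunk2 mirrors A's pairs list shape
def chunk2 : List Char → List (List Char)
  | a :: b :: rest => [a, b] :: chunk2 rest
  | [a] => [[a]]
  | [] => []

theorem pvChunks_eq (cs : List Char) :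
    (List.range ((cs.length + 1) / 2)).map (fun k => (cs.drop (2 * k)).take 2) = chunk2 cs := by
  induction cs using chunk2.induct with
  | case1 a b rest ih =>
      have hlen : ((a :: b :: rest).length + 1) / 2 = (rest.length + 1) / 2 + 1 := by
        simp only [List.length_cons]; omega
      rw [hlen, List.range_succ_eq_map, List.map_cons, List.map_map]
      rw [show chunk2 (a :: b :: rest) = [a, b] :: chunk2 rest from rfl]
      congr 1
  | case2 a => simp [chunk2, List.range_succ]
  | case3 => simp [chunk2]

theorem pvPairs_eq (cs : List Char) :
    (PySem.List.pyRange 0 (cs.length : Int) 2).map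
      (fun i => PySem.List.slice cs (some i) (some (i + 2))) = chunk2 cs := by
  rw [PySem.List.pyRange_of_pos 0 (cs.length : Int) (by norm_num), List.map_map]
  have hcount : (if (0 : Int) < (cs.length : Int) then (((cs.length : Int) - 0 + 2 - 1) / 2).toNat else 0)
      = (cs.length + 1) / 2 := by
    split_ifs with h
    · rw [show ((cs.length : Int) - 0 + 2 - 1) = ((cs.length + 1 : Nat) : Int) from by push_cast; ring,
        show ((2 : Int) = ((2 : Nat) : Int)) from rfl, ← Int.natCast_div, Int.toNat_natCast]
    · have hl : cs.length = 0 := by omega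
      simp [hl]
  rw [hcount, ← pvChunks_eq]
  apply List.map_congr_left; intro k _
  simp only [Function.comp_apply]
  rw [show (0 : Int) + 2 * (k : Int) = ((2 * k : Nat) : Int) from by push_cast; ring]
  exact_mod_cast PySem.List.slice_natCast_add cs (2 * k) 2

-- A's outer fold over enumerated chunks computes B's two-at-a-time pass, for any start index
theorem pvFoldA (cs : List Char) : ∀ (s : Int) (acc : List (List Char)),
    ((PySem.List.enumerate (chunk2 cs) s).foldl (fun res ip =>
      if ip.2.length = 2 then
        let adjusted := (PySem.List.enumerate ip.2 0).foldl (fun adj jc =>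
          let newPos := 2 * ip.1 + jc.1
          if PySem.Int.mod newPos 2 = 0 then adj ++ [pvShiftChar jc.2 (-1)]
          else adj ++ [pvShiftChar jc.2 1]) []
        res ++ [[PySem.List.pyGetD adjusted 1 ' ', PySem.List.pyGetD adjusted 0 ' ']]
      else
        let lastChar := PySem.List.pyGetD ip.2 0 ' '
        let newPos := 2 * ip.1
        if PySem.Int.mod newPos 2 = 0 then res ++ [[pvShiftChar lastChar (-1)]]
        else res ++ [[pvShiftChar lastChar 1]]) acc).flatten
      = acc.flatten ++ pvDecPairs cs := by
  induction cs using chunk2.induct with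
  | case1 a b rest ih =>
      intro s acc
      rw [show chunk2 (a :: b :: rest) = [a, b] :: chunk2 rest from rfl,
        PySem.List.enumerate_cons, List.foldl_cons, ih (s + 1)]
      have hm0 : PySem.Int.mod (2 * s + 0) 2 = 0 := by
        rw [add_zero, PySem.Int.mod_eq_zero_iff_dvd]; exact ⟨s, rfl⟩
      have hm1 : ¬ PySem.Int.mod (2 * s + (0 + 1)) 2 = 0 := by
        rw [zero_add, PySem.Int.mod_eq_zero_iff_dvd]
        intro h; obtain ⟨t, ht⟩ := h; omega
      rw [if_pos (show ([a, b] : List Char).length = 2 from rfl)]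
      simp only [PySem.List.enumerate_cons, PySem.List.enumerate_nil, List.foldl_cons,
        List.foldl_nil]
      rw [if_pos hm0, if_neg hm1]
      simp only [List.nil_append,
        show ∀ x y : Char, PySem.List.pyGetD [x, y] 1 ' ' = y from fun x y => rfl,
        show ∀ x y : Char, PySem.List.pyGetD [x, y] 0 ' ' = x from fun x y => rfl,
        List.flatten_append, List.flatten_cons, List.flatten_nil, List.append_nil,
        List.append_assoc, List.cons_append,
        show pvDecPairs (a :: b :: rest) = pvShiftB b 1 :: pvShiftB a (-1) :: pvDecPairs rest
          from rfl, pvShift_eq]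
  | case2 a =>
      intro s acc
      have hm0 : PySem.Int.mod (2 * s) 2 = 0 := by
        rw [PySem.Int.mod_eq_zero_iff_dvd]; exact ⟨s, rfl⟩
      rw [show chunk2 [a] = [[a]] from rfl, PySem.List.enumerate_cons,
        PySem.List.enumerate_nil, List.foldl_cons, List.foldl_nil]
      dsimp only
      rw [if_neg (show ¬ ([a] : List Char).length = 2 by simp), if_pos hm0]
      simp only [show PySem.List.pyGetD [a] 0 ' ' = a from rfl,
        List.flatten_append, List.flatten_cons, List.flatten_nil, List.append_nil,
        show pvDecPairs [a] = [pvShiftB a (-1)] from rfl, pvShift_eq]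
  | case3 =>
      intro s acc
      rw [show chunk2 [] = ([] : List (List Char)) from rfl, PySem.List.enumerate_nil,
        List.foldl_nil, show pvDecPairs [] = ([] : List Char) from rfl, List.append_nil]

-- A's slice-splice insertion equals Python list.insert
theorem pvInsert_eq (d : List Char) (p : Int) :
    PySem.List.slice d none (some p) ++ ' ' :: PySem.List.slice d (some p) none
      = PySem.List.insert d p ' ' := by
  have h1 : PySem.List.slice d none (some p) = List.take (PySem.List.clampIdx d.length p) d := by
    simp [PySem.List.slice]
  have h2 : PySem.List.slice d (some p) none = List.drop (PySem.List.clampIdx d.length p) d :=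
    PySem.List.slice_some_none d p
  have h3 : PySem.List.insert d p ' ' =
      List.take (PySem.List.clampIdx d.length p) d ++ ' ' :: List.drop (PySem.List.clampIdx d.length p) d := by
    unfold PySem.List.insert PySem.List.sliceIndices
    dsimp only
    have hk : (if p < 0 then max (p + (d.length : Int)) (if (1:Int) < 0 then -1 else 0)
        else min p (if (1:Int) < 0 then (d.length : Int) - 1 else (d.length : Int))).toNat
        = PySem.List.clampIdx d.length p := by
      unfold PySem.List.clampIdx
      norm_num
      split_ifs <;> omega
    rw [hk]
  rw [h1, h2, h3]

-- ===== VERDICT (by name: the statement is the Claim_ definition above) =====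
theorem custom_decrypt_spec : Claim_equal_custom_decrypt := by
  intro encrypted_text space_positions _
  unfold Spec_custom_decrypt custom_decrypt custom_decrypt_alt
  dsimp only
  rw [pvPairs_eq]
  have hcore := pvFoldA encrypted_text.toList 0 []
  simp only [List.flatten_nil, List.nil_append] at hcore
  rw [hcore]
  have hfun : (fun (d : List Char) (pos : Int) =>
      PySem.List.slice d none (some pos) ++ ' ' :: PySem.List.slice d (some pos) none)
      = fun d pos => PySem.List.insert d pos ' ' := by
    funext d pos; exact pvInsert_eq d pos
  rw [hfun]
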